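-- pv_equiv track=rewrite | github.com/ulpi-io/plugin-marketplace | plugins/reverse-engineer-rpi/skills/reverse-engineer-rpi/scripts/reverse_engineer_rpi.py | _detect_docs_prefix_from_paths
-- ===== SOURCE A (Python) =====
-- def _detect_docs_prefix_from_paths(paths: list[str]) -> str:
--     """
--     Choose docs prefix from sitemap-style path inventory.
--     """
--     normalized: list[str] = []
--     for raw in paths:
--         p = raw.strip()
--         if not p:
--             continue
--         if not p.startswith("/"):
--             p = "/" + p
--         normalized.append(p)
--
--     if not normalized:
--         return "docs/features/"
--
--     candidates = [
--         "docs/features/",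
--         "docs/code-map/",
--         "docs/workflows/",
--         "docs/levels/",
--         "docs/",
--     ]
--     best = "docs/features/"
--     best_count = -1
--     for cand in candidates:
--         prefix = "/" + cand.strip("/").rstrip("/")
--         count = sum(1 for p in normalized if p == prefix or p.startswith(prefix + "/"))
--         if count > best_count:
--             best = cand
--             best_count = count
--     return best
-- ===== SOURCE B (Python) =====
-- def _detect_docs_prefix_from_paths(paths: list[str]) -> str:
--     """
--     Choose docs prefix from sitemap-style path inventory.
--     Classification algorithm: instead of matching every path against every
--     candidate prefix, each path is classified once -- is it under /docs at all,
--     and if so which single subcategory segment follows "/docs/" (the four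
--     subcategories are mutually exclusive, so one segment lookup replaces five
--     prefix tests).  Selection then takes the first-max subcategory bucket and
--     prefers "docs/" only when the docs total strictly beats it.
--     """
--     subcats = ["features", "code-map", "workflows", "levels"]
--     buckets = {name: 0 for name in subcats}
--     docs_total = 0
--     saw_path = False
--     for raw in paths:
--         p = raw.strip()
--         if not p:
--             continue
--         saw_path = True
--         if not p.startswith("/"):
--             p = "/" + p
--         if p == "/docs" or p.startswith("/docs/"):
--             docs_total += 1
--             seg = p[6:].split("/", 1)[0]
--             if seg in buckets:
--                 buckets[seg] += 1
--     if not saw_path: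
--         return "docs/features/"
--     best_name = "features"
--     best_count = buckets["features"]
--     for name in subcats[1:]:
--         if buckets[name] > best_count:
--             best_name = name
--             best_count = buckets[name]
--     if docs_total > best_count:
--         return "docs/"
--     return "docs/" + best_name + "/"
-- ===== Notes on version B (the rewrite author's own statement) =====
-- stated objective: faster
-- what changed: A counts, for each of five candidate prefixes, how many normalized paths match it (five prefix tests per path); B never matches candidates against paths: it classifies each path once by extracting the single segment after '/docs/' and tallying it into a bucket dict plus a docs total (the four subcategories are mutually exclusive), then picks the first-max bucket unless the docs total strictly beats it.
import Mathlib
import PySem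

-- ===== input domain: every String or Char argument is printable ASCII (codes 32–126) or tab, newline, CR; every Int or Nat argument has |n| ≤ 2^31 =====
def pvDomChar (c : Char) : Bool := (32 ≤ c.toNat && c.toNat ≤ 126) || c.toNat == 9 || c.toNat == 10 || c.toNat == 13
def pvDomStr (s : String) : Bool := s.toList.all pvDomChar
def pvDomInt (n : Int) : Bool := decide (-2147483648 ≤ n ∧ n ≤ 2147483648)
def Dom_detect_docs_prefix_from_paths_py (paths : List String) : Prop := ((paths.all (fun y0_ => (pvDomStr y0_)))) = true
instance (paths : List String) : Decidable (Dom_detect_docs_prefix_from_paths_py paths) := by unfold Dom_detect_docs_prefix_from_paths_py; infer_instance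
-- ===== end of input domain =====

-- B replaces A's five candidate-prefix counting scans by a classification pass: each path is
-- classified once (under /docs at all, and which single segment follows "/docs/"), buckets are
-- tallied per segment, and the winner is the first-max bucket unless the docs total strictly beats it.

-- ===== PORT A =====
def pvCandidates : List String :=
  ["docs/features/", "docs/code-map/", "docs/workflows/", "docs/levels/", "docs/"]

-- hand port of str.rstrip("/") (rstrip with an explicit chars argument): drop trailing '/' — exact
def pvRstripSlash (cs : List Char) : List Char := (cs.reverse.dropWhile (fun c => c = '/')).reverse

-- "/" + cand.strip("/").rstrip("/")
def pvPrefixA (cand : String) : List Char :=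
  '/' :: pvRstripSlash (PySem.Chars.stripChars cand.toList ['/'])

-- p == prefix or p.startswith(prefix + "/")
def pvMatchA (pref p : List Char) : Bool :=
  p == pref || PySem.Chars.startswith p (pref ++ ['/'])

-- the normalization loop of A
def pvNormalize (paths : List String) : List (List Char) :=
  paths.foldl (fun acc raw =>
    let p := PySem.Chars.strip raw.toList
    if p = [] then acc
    else acc ++ [if PySem.Chars.startswith p ['/'] then p else '/' :: p]) []

def detect_docs_prefix_from_paths_py (paths : List String) : String :=
  let normalized := pvNormalize paths
  if normalized = [] then "docs/features/"
  else
    (pvCandidates.foldl (fun (st : String × Int) cand =>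
      let pref := pvPrefixA cand
      let count : Int := (normalized.map (fun p => if pvMatchA pref p then (1 : Int) else 0)).sum
      if st.2 < count then (cand, count) else st) ("docs/features/", -1)).1

-- ===== PORT B =====
-- B's subcategory names
def pvSubcats : List (List Char) :=
  ["features".toList, "code-map".toList, "workflows".toList, "levels".toList]

-- p == "/docs" or p.startswith("/docs/")
def pvIsDocs (p : List Char) : Bool :=
  p == "/docs".toList || PySem.Chars.startswith p "/docs/".toList

-- p[6:].split("/", 1)[0] — the longest '/'-free prefix of p[6:]; hand port, exact
def pvSeg (p : List Char) : List Char :=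
  (PySem.Chars.slice p (some 6) none).takeWhile (fun c => c != '/')

-- loop body of B: classify one raw path (saw_path flag, docs total, buckets)
def pvClassify (st : Bool × Int × PySem.Dict (List Char) Int) (raw : String) :
    Bool × Int × PySem.Dict (List Char) Int :=
  let p := PySem.Chars.strip raw.toList
  if p = [] then st
  else
    let p := if PySem.Chars.startswith p ['/'] then p else '/' :: p
    if pvIsDocs p then
      let seg := pvSeg p
      if st.2.2.contains seg then (true, st.2.1 + 1, st.2.2.modify seg 0 (· + 1))
      else (true, st.2.1 + 1, st.2.2)
    else (true, st.2.1, st.2.2)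

def detect_docs_prefix_from_paths_py_alt (paths : List String) : String :=
  let buckets0 : PySem.Dict (List Char) Int :=
    pvSubcats.foldl (fun d n => d.insert n 0) PySem.Dict.empty
  let st := paths.foldl pvClassify (false, 0, buckets0)
  if !st.1 then "docs/features/"
  else
    let best := (pvSubcats.drop 1).foldl
      (fun (b : List Char × Int) name =>
        if b.2 < st.2.2.getD name 0 then (name, st.2.2.getD name 0) else b)
      ("features".toList, st.2.2.getD "features".toList 0)
    if best.2 < st.2.1 then "docs/"
    else String.ofList ("docs/".toList ++ best.1 ++ ['/'])

-- ===== PRECONDITION & SPEC =====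
def Spec_detect_docs_prefix_from_paths_py (paths : List String) (out : String) : Prop := out = detect_docs_prefix_from_paths_py_alt paths
instance (paths : List String) (out : String) : Decidable (Spec_detect_docs_prefix_from_paths_py paths out) := by unfold Spec_detect_docs_prefix_from_paths_py; infer_instance

-- ===== CLAIM (what is proved, stated in full; the proofs are below) =====
def Claim_equal_detect_docs_prefix_from_paths_py : Prop := ∀ (paths : List String), Dom_detect_docs_prefix_from_paths_py paths → Spec_detect_docs_prefix_from_paths_py paths (detect_docs_prefix_from_paths_py paths)

-- ===== LEMMAS AND PROOFS =====

-- one normalized element per kept path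
def pvNormOne (raw : String) : List Char :=
  let p := PySem.Chars.strip raw.toList
  if PySem.Chars.startswith p ['/'] then p else '/' :: p

-- the normalized list in filter/map form
lemma pvNormalize_eq (paths : List String) :
    pvNormalize paths
      = (paths.filter (fun raw => PySem.Chars.strip raw.toList ≠ [])).map pvNormOne := by
  have aux : ∀ (ps : List String) (acc : List (List Char)),
      ps.foldl (fun acc raw =>
        let p := PySem.Chars.strip raw.toList
        if p = [] then acc
        else acc ++ [if PySem.Chars.startswith p ['/'] then p else '/' :: p]) acc
      = acc ++ (ps.filter (fun raw => PySem.Chars.strip raw.toList ≠ [])).map pvNormOne := by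
    intro ps
    induction ps with
    | nil => simp
    | cons h t ih =>
      intro acc
      simp only [List.foldl_cons, List.filter_cons]
      by_cases hp : PySem.Chars.strip h.toList = []
      · simp [hp, ih]
      · simp [hp, ih, pvNormOne]
  simpa using aux paths []

-- r matches "name or name/…" iff r's first '/'-free segment is exactly name
lemma pv_name_match (name : List Char) (h : '/' ∉ name) : ∀ r : List Char,
    (r = name ∨ name ++ ['/'] <+: r) ↔ r.takeWhile (fun c => c != '/') = name := by
  induction name with
  | nil =>
    intro r
    cases r with
    | nil => simp
    | cons b r' =>
      by_cases hb : b = '/'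
      · subst hb; simp [List.takeWhile_cons, List.cons_prefix_cons]
      · simp [hb, List.cons_prefix_cons, Ne.symm hb]
  | cons a name' ih =>
    have ha : a ≠ '/' := fun hc => h (hc ▸ List.mem_cons_self)
    have h' : '/' ∉ name' := fun hc => h (List.mem_cons_of_mem _ hc)
    intro r
    cases r with
    | nil => simp
    | cons b r' =>
      by_cases hb : b = a
      · subst hb
        have hbs : (b != '/') = true := by simp [ha]
        simp [List.takeWhile_cons, hbs, List.cons_prefix_cons, ih h' r', List.cons_append]
      · by_cases hbsl : b = '/'
        · subst hbsl
          simp [List.takeWhile_cons, List.cons_prefix_cons, Ne.symm hb, hb]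
        · have hbs : (b != '/') = true := by simp [hbsl]
          simp only [List.takeWhile_cons, hbs, if_true, List.cons_prefix_cons, List.cons_append,
            List.cons_eq_cons]
          constructor
          · rintro (⟨rfl, _⟩ | ⟨rfl, _⟩) <;> exact absurd rfl hb
          · rintro ⟨rfl, _⟩; exact absurd rfl hb

-- A's match predicate for a subcategory candidate, in B's classification form
lemma pvMatchA_sub (name : List Char) (hslash : '/' ∉ name) (hne : name ≠ []) (p : List Char) :
    pvMatchA ("/docs/".toList ++ name) p = (pvIsDocs p && (pvSeg p == name)) := by
  rw [Bool.eq_iff_iff]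
  simp only [pvMatchA, pvIsDocs, Bool.or_eq_true, Bool.and_eq_true, beq_iff_eq,
    PySem.Chars.startswith_iff]
  by_cases hd : "/docs/".toList <+: p
  · obtain ⟨r, rfl⟩ := hd
    have hseg : pvSeg ("/docs/".toList ++ r) = r.takeWhile (fun c => c != '/') := by
      simp only [pvSeg, PySem.Chars.slice_eq_listSlice]
      rw [show ((6:Int)) = ((6:Nat):Int) from rfl, PySem.List.slice_from_natCast,
        show (6:Nat) = ("/docs/".toList).length from by decide, List.drop_left]
    rw [hseg]
    constructor
    · rintro (heq | hpre)
      · have : r = name := by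
          have := heq; rwa [List.append_cancel_left_eq] at this
        exact ⟨Or.inr (List.prefix_append _ _), (pv_name_match name hslash r).mp (Or.inl this)⟩
      · rw [List.append_assoc] at hpre
        rw [List.prefix_append_right_inj] at hpre
        exact ⟨Or.inr (List.prefix_append _ _), (pv_name_match name hslash r).mp (Or.inr hpre)⟩
    · rintro ⟨_, hseg'⟩
      rcases (pv_name_match name hslash r).mpr hseg' with heq | hpre
      · exact Or.inl (by rw [heq])
      · exact Or.inr (by rw [List.append_assoc, List.prefix_append_right_inj]; exact hpre)
  · constructor
    · rintro (heq | hpre)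
      · exact absurd (heq ▸ List.prefix_append _ _) hd
      · exact absurd (List.IsPrefix.trans (by rw [List.append_assoc]; exact List.prefix_append _ _) hpre) hd
    · rintro ⟨hdocs | hpre, hseg'⟩
      · exfalso
        subst hdocs
        have : pvSeg ("/docs".toList) = [] := by decide
        rw [this] at hseg'
        exact hne hseg'.symm
      · exact absurd hpre hd

-- A's match predicate for the "docs/" candidate is B's isDocs test
lemma pvMatchA_docs (p : List Char) : pvMatchA (pvPrefixA "docs/") p = pvIsDocs p := by
  have h1 : pvPrefixA "docs/" = "/docs".toList := by decide
  have h2 : "/docs".toList ++ ['/'] = "/docs/".toList := by decide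
  rw [h1]; unfold pvMatchA pvIsDocs; rw [h2]

-- the initial buckets dict: keys are exactly the subcategory names, values 0
lemma pvB0_contains (k : List Char) :
    ((pvSubcats.foldl (fun d n => d.insert n 0) (PySem.Dict.empty : PySem.Dict (List Char) Int)).contains k)
      = decide (k ∈ pvSubcats) := by
  simp only [pvSubcats, List.foldl_cons, List.foldl_nil]
  rw [Bool.eq_iff_iff]
  simp [PySem.Dict.contains_insert, List.mem_cons]
  tauto

lemma pvB0_getD (k : List Char) (hk : k ∈ pvSubcats) :
    ((pvSubcats.foldl (fun d n => d.insert n 0) (PySem.Dict.empty : PySem.Dict (List Char) Int)).getD k 0) = 0 := by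
  fin_cases hk <;> decide

-- invariant of B's classification pass
lemma pvClassify_inv (paths : List String) :
    ∀ (st : Bool × Int × PySem.Dict (List Char) Int),
    (∀ k, st.2.2.contains k = decide (k ∈ pvSubcats)) →
    ((paths.foldl pvClassify st).1 = (st.1 || decide (pvNormalize paths ≠ []))
     ∧ (paths.foldl pvClassify st).2.1
         = st.2.1 + ((pvNormalize paths).countP pvIsDocs : Int)
     ∧ (∀ k, (paths.foldl pvClassify st).2.2.contains k = decide (k ∈ pvSubcats))
     ∧ ∀ k ∈ pvSubcats, (paths.foldl pvClassify st).2.2.getD k 0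
         = st.2.2.getD k 0 + ((pvNormalize paths).countP (fun p => pvIsDocs p && pvSeg p == k) : Int)) := by
  induction paths with
  | nil =>
    intro st h
    refine ⟨by simp [pvNormalize], by simp [pvNormalize], h, by simp [pvNormalize]⟩
  | cons raw t ih =>
    intro st hkeys
    rw [List.foldl_cons]
    by_cases hp : PySem.Chars.strip raw.toList = []
    · have hn : pvNormalize (raw :: t) = pvNormalize t := by
        rw [pvNormalize_eq, pvNormalize_eq, List.filter_cons]; simp [hp]
      have hstep : pvClassify st raw = st := by simp [pvClassify, hp]
      rw [hstep, hn]
      exact ih st hkeys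
    · have hn : pvNormalize (raw :: t) = pvNormOne raw :: pvNormalize t := by
        rw [pvNormalize_eq, pvNormalize_eq, List.filter_cons]; simp [hp]
      have hqe : (if PySem.Chars.startswith (PySem.Chars.strip raw.toList) ['/'] = true
            then PySem.Chars.strip raw.toList else '/' :: PySem.Chars.strip raw.toList)
          = pvNormOne raw := rfl
      by_cases hd : pvIsDocs (pvNormOne raw) = true
      · by_cases hm : pvSeg (pvNormOne raw) ∈ pvSubcats
        · have hstep : pvClassify st raw
              = (true, st.2.1 + 1, st.2.2.modify (pvSeg (pvNormOne raw)) 0 (· + 1)) := by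
            simp [pvClassify, hp, hqe, hd, hkeys, hm]
          rw [hstep]
          have hkeys' : ∀ k,
              (st.2.2.modify (pvSeg (pvNormOne raw)) 0 (· + 1)).contains k
                = decide (k ∈ pvSubcats) := by
            intro k
            rw [PySem.Dict.contains_modify]
            by_cases hk : k = pvSeg (pvNormOne raw)
            · simp [hk, hm]
            · simp [hk, hkeys]
          obtain ⟨i1, i2, i3, i4⟩ := ih
            ((true, st.2.1 + 1, st.2.2.modify (pvSeg (pvNormOne raw)) 0 (· + 1)) :
              Bool × Int × PySem.Dict (List Char) Int) hkeys'
          refine ⟨by rw [i1, hn]; simp, ?_, i3, ?_⟩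
          · rw [i2, hn, List.countP_cons]
            simp only [hd, if_true]
            push_cast
            ring
          · intro k hk
            rw [i4 k hk, hn, List.countP_cons]
            simp only [PySem.Dict.getD_modify]
            by_cases hk2 : k = pvSeg (pvNormOne raw)
            · have hbe : (pvSeg (pvNormOne raw) == k) = true := by simp [hk2]
              simp only [if_pos hk2, hk2, hd, hbe, beq_self_eq_true, Bool.true_and, Bool.and_self, if_true]
              push_cast
              ring
            · have hbe : (pvSeg (pvNormOne raw) == k) = false := by
                simp only [beq_eq_false_iff_ne, ne_eq]
                exact fun hc => hk2 hc.symm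
              simp only [if_neg hk2, hd, hbe, Bool.and_false, Bool.false_eq_true, if_false]
              push_cast
              ring
        · have hstep : pvClassify st raw = (true, st.2.1 + 1, st.2.2) := by
            simp [pvClassify, hp, hqe, hd, hkeys, hm]
          rw [hstep]
          obtain ⟨i1, i2, i3, i4⟩ := ih
            ((true, st.2.1 + 1, st.2.2) : Bool × Int × PySem.Dict (List Char) Int) hkeys
          refine ⟨by rw [i1, hn]; simp, ?_, i3, ?_⟩
          · rw [i2, hn, List.countP_cons]
            simp only [hd, if_true]
            push_cast
            ring
          · intro k hk
            rw [i4 k hk, hn, List.countP_cons]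
            have hbe : (pvSeg (pvNormOne raw) == k) = false := by
              simp only [beq_eq_false_iff_ne, ne_eq]
              exact fun hc => hm (hc ▸ hk)
            simp only [hd, hbe, Bool.and_false, Bool.false_eq_true, if_false]
            push_cast
            ring
      · have hstep : pvClassify st raw = (true, st.2.1, st.2.2) := by
          simp [pvClassify, hp, hqe, hd]
        rw [hstep]
        obtain ⟨i1, i2, i3, i4⟩ := ih
          ((true, st.2.1, st.2.2) : Bool × Int × PySem.Dict (List Char) Int) hkeys
        refine ⟨by rw [i1, hn]; simp, ?_, i3, ?_⟩
        · rw [i2, hn, List.countP_cons]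
          simp only [hd, Bool.false_eq_true, if_false]
          push_cast
          ring
        · intro k hk
          rw [i4 k hk, hn, List.countP_cons]
          simp only [hd, Bool.false_and, Bool.false_eq_true, if_false]
          push_cast
          ring

-- count of normalized paths classified into subcategory k / under docs at all
def pvCnt (paths : List String) (k : List Char) : Int :=
  ((pvNormalize paths).countP (fun p => pvIsDocs p && pvSeg p == k) : Int)

def pvCntD (paths : List String) : Int :=
  ((pvNormalize paths).countP pvIsDocs : Int)

-- A's per-candidate count, in classification terms
lemma pvAcount (paths : List String) (cand : String) (name : List Char)
    (hpref : pvPrefixA cand = "/docs/".toList ++ name) (hslash : '/' ∉ name) (hne : name ≠ []) :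
    ((pvNormalize paths).map (fun p => if pvMatchA (pvPrefixA cand) p then (1 : Int) else 0)).sum
      = pvCnt paths name := by
  rw [hpref, PySem.List.sum_map_ite_one_zero]
  unfold pvCnt
  congr 1
  apply List.countP_congr
  intro p _
  rw [pvMatchA_sub name hslash hne p]

lemma pvAcountD (paths : List String) :
    ((pvNormalize paths).map (fun p => if pvMatchA (pvPrefixA "docs/") p then (1 : Int) else 0)).sum
      = pvCntD paths := by
  have hfun : pvMatchA (pvPrefixA "docs/") = pvIsDocs := funext pvMatchA_docs
  rw [PySem.List.sum_map_ite_one_zero, hfun]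
  rfl

-- ===== VERDICT (by name: the statement is the Claim_ definition above) =====
set_option maxHeartbeats 4000000 in
theorem detect_docs_prefix_from_paths_py_spec : Claim_equal_detect_docs_prefix_from_paths_py := by
  intro paths _
  unfold Spec_detect_docs_prefix_from_paths_py
  obtain ⟨i1, i2, i3, i4⟩ := pvClassify_inv paths
    ((false, 0, pvSubcats.foldl (fun d n => d.insert n 0) PySem.Dict.empty) :
      Bool × Int × PySem.Dict (List Char) Int) pvB0_contains
  simp only [detect_docs_prefix_from_paths_py, detect_docs_prefix_from_paths_py_alt]
  by_cases hn : pvNormalize paths = []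
  · rw [if_pos hn, i1]
    simp [hn]
  · rw [if_neg hn, i1]
    simp only [hn, ne_eq, not_false_iff, decide_true, Bool.or_true, Bool.not_true,
      Bool.false_eq_true, if_false]
    have hv : ∀ k, k ∈ pvSubcats →
        ((paths.foldl pvClassify
          ((false, 0, pvSubcats.foldl (fun d n => d.insert n 0) PySem.Dict.empty) :
            Bool × Int × PySem.Dict (List Char) Int)).2.2.getD k 0) = pvCnt paths k := by
      intro k hk
      rw [i4 k hk]
      have : ((false, (0 : Int), pvSubcats.foldl (fun d n => d.insert n 0)
          (PySem.Dict.empty : PySem.Dict (List Char) Int)).2.2.getD k 0) = 0 := pvB0_getD k hk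
      rw [this, zero_add]
      rfl
    rw [show pvSubcats.drop 1 = ["code-map".toList, "workflows".toList, "levels".toList] from rfl]
    simp only [pvCandidates, List.foldl_cons, List.foldl_nil]
    rw [pvAcount paths "docs/features/" "features".toList (by decide) (by decide) (by decide),
      pvAcount paths "docs/code-map/" "code-map".toList (by decide) (by decide) (by decide),
      pvAcount paths "docs/workflows/" "workflows".toList (by decide) (by decide) (by decide),
      pvAcount paths "docs/levels/" "levels".toList (by decide) (by decide) (by decide),
      pvAcountD paths,
      hv "features".toList (by decide), hv "code-map".toList (by decide),
      hv "workflows".toList (by decide), hv "levels".toList (by decide), i2]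
    have hd0 : ((false, (0 : Int), pvSubcats.foldl (fun d n => d.insert n 0)
        (PySem.Dict.empty : PySem.Dict (List Char) Int)).2.1) = 0 := rfl
    rw [hd0, zero_add]
    have ha : 0 ≤ pvCnt paths "features".toList := Int.natCast_nonneg _
    have hb : 0 ≤ pvCnt paths "code-map".toList := Int.natCast_nonneg _
    have hc : 0 ≤ pvCnt paths "workflows".toList := Int.natCast_nonneg _
    have hl : 0 ≤ pvCnt paths "levels".toList := Int.natCast_nonneg _
    generalize pvCnt paths "features".toList = a at ha ⊢
    generalize pvCnt paths "code-map".toList = b at hb ⊢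
    generalize pvCnt paths "workflows".toList = c at hc ⊢
    generalize pvCnt paths "levels".toList = d at hl ⊢
    have hcd : (↑(List.countP pvIsDocs (pvNormalize paths)) : Int) = pvCntD paths := rfl
    rw [hcd]
    generalize pvCntD paths = e
    simp only [apply_ite (Prod.fst (α := String) (β := Int)),
      apply_ite (Prod.snd (α := String) (β := Int)),
      apply_ite (Prod.fst (α := List Char) (β := Int)),
      apply_ite (Prod.snd (α := List Char) (β := Int))]
    split_ifs <;> first | rfl | decide | (exfalso; omega)
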